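-- pv_equiv track=rewrite | github.com/MrBrantCode/unitest_baseline | mut_generate/mist_train_cf/cf_21629/solution.py | get_unique_vowels
-- ===== SOURCE A (Python) =====
-- def get_unique_vowels(string):
--     """
--     This function takes a string as input and returns a list of unique vowels found in the string.
--     It excludes vowels that appear after a consonant and ignores consecutive occurrences of the same vowel.
--     The function is case-insensitive and considers the standard English vowels 'a', 'e', 'i', 'o', and 'u'.
--
--     Args:
--         string (str): The input string to find unique vowels from.
--
--     Returns:
--         list: A list of unique vowels found in the string.
--     """
--
--     vowels = ['a', 'e', 'i', 'o', 'u']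
--     unique_vowels = []
--     previous_consonant = False
--
--     for char in string:
--         if char.lower() in vowels:
--             if not previous_consonant:
--                 if char.lower() not in unique_vowels:
--                     unique_vowels.append(char.lower())
--             previous_consonant = False
--         else:
--             previous_consonant = True
--
--     return unique_vowels
-- ===== SOURCE B (Python) =====
-- def get_unique_vowels(string):
--     # Run-based scan: find each maximal run of vowels; a run keeps all its
--     # vowels if it starts at index 0, otherwise all but its first vowel.
--     vowels = set('aeiouAEIOU')
--     result = []
--     i, n = 0, len(string)
--     while i < n:
--         if string[i] in vowels:
--             j = i
--             while j < n and string[j] in vowels: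
--                 j += 1
--             for k in range(i if i == 0 else i + 1, j):
--                 v = string[k].lower()
--                 if v not in result:
--                     result.append(v)
--             i = j
--         else:
--             i += 1
--     return result
-- ===== Notes on version B (the rewrite author's own statement) =====
-- stated objective: alternative
-- what changed: Replaces A's per-character previous-consonant flag loop by a run-based scan: find each maximal run of vowels and take all of it when it starts at index 0, otherwise all but its first vowel, deduping lowercased vowels in first-occurrence order.
import Mathlib
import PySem

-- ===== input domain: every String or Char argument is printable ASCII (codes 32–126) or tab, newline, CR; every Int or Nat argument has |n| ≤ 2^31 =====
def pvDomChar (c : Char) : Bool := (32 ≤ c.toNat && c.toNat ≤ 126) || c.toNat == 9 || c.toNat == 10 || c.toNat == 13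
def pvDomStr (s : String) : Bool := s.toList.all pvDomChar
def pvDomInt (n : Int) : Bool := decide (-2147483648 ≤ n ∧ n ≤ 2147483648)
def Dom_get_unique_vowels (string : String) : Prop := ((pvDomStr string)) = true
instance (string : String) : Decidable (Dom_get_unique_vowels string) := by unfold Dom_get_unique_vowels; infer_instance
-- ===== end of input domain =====

-- B replaces A's per-character previous-consonant flag by a scan over maximal vowel runs
-- (keep a whole run at index 0, drop a non-initial run's first vowel); objective: alternative decomposition, same cost.

-- ===== PORT A =====
-- char.lower() on a one-character string
def pvLowS (c : Char) : String := String.singleton (PySem.Chars.lowerChar c)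

-- the body of A's for-loop, on state (unique_vowels, previous_consonant)
def pvAStep (st : List String × Bool) (c : Char) : List String × Bool :=
  if pvLowS c ∈ ["a", "e", "i", "o", "u"] then
    (if st.2 then st.1
     else if pvLowS c ∈ st.1 then st.1 else st.1 ++ [pvLowS c], false)
  else (st.1, true)

def get_unique_vowels (string : String) : List String :=
  (string.toList.foldl pvAStep ([], false)).1

-- ===== PORT B =====
def pvIsVow (c : Char) : Bool := decide (pvLowS c ∈ ["a", "e", "i", "o", "u"])

-- append the lowered vowel if not already collected
def pvAddU (acc : List String) (c : Char) : List String :=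
  if pvLowS c ∈ acc then acc else acc ++ [pvLowS c]

-- run-based scan: on a vowel, take the whole maximal run (all of it when at index 0,
-- else all but its first vowel) and continue after the run
def pvAltGo : List Char → Bool → List String → List String
  | [], _, acc => acc
  | c :: rest, atStart, acc =>
    if pvIsVow c then
      pvAltGo (rest.dropWhile pvIsVow) false
        ((if atStart then c :: rest.takeWhile pvIsVow else rest.takeWhile pvIsVow).foldl pvAddU acc)
    else pvAltGo rest false acc
termination_by cs _ _ => cs.length
decreasing_by
  · exact Nat.lt_succ_of_le (rest.length_dropWhile_le _)
  · simp

def get_unique_vowels_alt (string : String) : List String :=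
  pvAltGo string.toList true []

-- ===== PRECONDITION & SPEC =====
def Spec_get_unique_vowels (string : String) (out : List String) : Prop := out = get_unique_vowels_alt string
instance (string : String) (out : List String) : Decidable (Spec_get_unique_vowels string out) := by unfold Spec_get_unique_vowels; infer_instance

-- ===== CLAIM (what is proved, stated in full; the proofs are below) =====
def Claim_equal_get_unique_vowels : Prop := ∀ (string : String), Dom_get_unique_vowels string → Spec_get_unique_vowels string (get_unique_vowels string)

-- ===== LEMMAS AND PROOFS =====

-- A's loop over a block of vowels with the flag down just collects them one by one
lemma pvA_run (run : List Char) : ∀ (rest : List Char) (acc : List String),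
    (∀ c ∈ run, pvIsVow c = true) →
    ((run ++ rest).foldl pvAStep (acc, false)) = rest.foldl pvAStep (run.foldl pvAddU acc, false) := by
  induction run with
  | nil => intro rest acc _; rfl
  | cons c run' ih =>
    intro rest acc h
    have hc : pvIsVow c = true := h c (List.mem_cons_self)
    have hstep : pvAStep (acc, false) c = (pvAddU acc c, false) := by
      simp only [pvAStep, pvAddU, pvIsVow, decide_eq_true_eq] at hc ⊢
      simp [hc]
    simp only [List.cons_append, List.foldl_cons, hstep]
    exact ih rest (pvAddU acc c) (fun d hd => h d (List.mem_cons_of_mem _ hd))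

-- the main correspondence: A's flag=false state matches altGo at the start,
-- flag=true matches altGo with atStart=false
lemma pvMain : ∀ (n : Nat) (cs : List Char), cs.length ≤ n → ∀ (acc : List String),
    ((cs.foldl pvAStep (acc, false)).1 = pvAltGo cs true acc) ∧
    ((cs.foldl pvAStep (acc, true)).1 = pvAltGo cs false acc) := by
  intro n
  induction n with
  | zero =>
    intro cs hlen acc
    have : cs = [] := List.eq_nil_of_length_eq_zero (Nat.le_zero.mp hlen)
    subst this
    constructor <;> simp [pvAltGo]
  | succ m ih =>
    intro cs hlen acc
    match cs with
    | [] => constructor <;> simp [pvAltGo]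
    | c :: rest =>
      have hrest : rest.length ≤ m := Nat.lt_succ_iff.mp hlen
      by_cases hv : pvIsVow c = true
      · -- vowel head: split rest into its vowel run and the remainder
        have hvs : pvLowS c ∈ ["a", "e", "i", "o", "u"] := by
          simpa [pvIsVow] using hv
        have hsplit : rest = rest.takeWhile pvIsVow ++ rest.dropWhile pvIsVow :=
          (List.takeWhile_append_dropWhile (p := pvIsVow)).symm
        have hallrun : ∀ d ∈ rest.takeWhile pvIsVow, pvIsVow d = true :=
          fun d hd => List.mem_takeWhile_imp hd
        -- the remainder after the run is either empty or starts with a non-vowel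
        have hcont : ∀ (X : List String),
            ((rest.dropWhile pvIsVow).foldl pvAStep (X, false)).1
              = pvAltGo (rest.dropWhile pvIsVow) false X := by
          intro X
          match hdw : rest.dropWhile pvIsVow with
          | [] => simp [pvAltGo]
          | d :: t =>
            have hnd : pvIsVow d = false := by
              have := List.head?_dropWhile_not pvIsVow rest
              rw [hdw] at this; simpa using this
            have hnds : pvLowS d ∉ ["a", "e", "i", "o", "u"] := by
              simpa [pvIsVow] using hnd
            have ht : t.length ≤ m := by
              have h1 : (rest.dropWhile pvIsVow).length ≤ rest.length :=
                rest.length_dropWhile_le _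
              rw [hdw] at h1; simp at h1; omega
            have hstep : pvAStep (X, false) d = (X, true) := by
              simp [pvAStep, hnds]
            simp only [List.foldl_cons, hstep, pvAltGo, hnd]
            simp only [Bool.false_eq_true, if_false]
            exact (ih t ht X).2
        constructor
        · -- flag false: c is collected, then the run, then continue
          have hstep : pvAStep (acc, false) c = (pvAddU acc c, false) := by
            simp [pvAStep, pvAddU, hvs]
          calc ((c :: rest).foldl pvAStep (acc, false)).1
              = (rest.foldl pvAStep (pvAddU acc c, false)).1 := by
                simp only [List.foldl_cons, hstep]
            _ = ((rest.dropWhile pvIsVow).foldl pvAStep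
                  ((rest.takeWhile pvIsVow).foldl pvAddU (pvAddU acc c), false)).1 := by
                conv_lhs => rw [hsplit]
                rw [pvA_run _ _ _ hallrun]
            _ = pvAltGo (rest.dropWhile pvIsVow) false
                  ((c :: rest.takeWhile pvIsVow).foldl pvAddU acc) := by
                rw [hcont]; rfl
            _ = pvAltGo (c :: rest) true acc := by
                rw [pvAltGo]; simp [hv]
        · -- flag true: c is skipped, flag drops, then the run, then continue
          have hstep : pvAStep (acc, true) c = (acc, false) := by
            simp [pvAStep, hvs]
          calc ((c :: rest).foldl pvAStep (acc, true)).1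
              = (rest.foldl pvAStep (acc, false)).1 := by
                simp only [List.foldl_cons, hstep]
            _ = ((rest.dropWhile pvIsVow).foldl pvAStep
                  ((rest.takeWhile pvIsVow).foldl pvAddU acc, false)).1 := by
                conv_lhs => rw [hsplit]
                rw [pvA_run _ _ _ hallrun]
            _ = pvAltGo (rest.dropWhile pvIsVow) false
                  ((rest.takeWhile pvIsVow).foldl pvAddU acc) := hcont _
            _ = pvAltGo (c :: rest) false acc := by
                rw [pvAltGo]; simp [hv]
      · -- non-vowel head: list unchanged, flag raised
        have hns : pvLowS c ∉ ["a", "e", "i", "o", "u"] := by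
          simpa [pvIsVow] using hv
        have hstep : ∀ b, pvAStep (acc, b) c = (acc, true) := by
          intro b; simp [pvAStep, hns]
        have htail := (ih rest hrest acc).2
        constructor
        · simp only [List.foldl_cons, hstep]
          rw [htail, pvAltGo]; simp [hv]
        · simp only [List.foldl_cons, hstep]
          rw [htail, pvAltGo]; simp [hv]

-- ===== VERDICT (by name: the statement is the Claim_ definition above) =====
theorem get_unique_vowels_spec : Claim_equal_get_unique_vowels := by
  intro s _
  unfold Spec_get_unique_vowels get_unique_vowels get_unique_vowels_alt
  exact (pvMain s.toList.length s.toList le_rfl []).1
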